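-- pv_equiv track=rewrite | github.com/clemensv/real-time-sources | snotel/snotel/snotel.py | parse_csv_response
-- ===== SOURCE A (Python) =====
-- from typing import Dict, List, Optional, Tuple
--
-- def parse_csv_response(csv_text: str) -> Tuple[List[str], List[List[str]]]:
--     """
--     Parse a SNOTEL CSV response.
--
--     Skips comment lines (starting with '#') and empty lines.
--     Returns the header row and data rows.
--
--     Args:
--         csv_text: The raw CSV text from the Report Generator.
--
--     Returns:
--         Tuple of (header_fields, list_of_data_rows).
--     """
--     headers: List[str] = []
--     rows: List[List[str]] = []
--
--     for line in csv_text.splitlines():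
--         stripped = line.strip()
--         if not stripped or stripped.startswith('#'):
--             continue
--         fields = [f.strip() for f in stripped.split(',')]
--         if not headers:
--             headers = fields
--         else:
--             rows.append(fields)
--
--     return headers, rows
-- ===== SOURCE B (Python) =====
-- def parse_csv_response(csv_text: str):
--     """Parse a SNOTEL CSV response in two staged passes: an index scan locates
--     the header line, then a reverse-order sweep over the later lines builds the
--     data rows back-to-front."""
--     lines = csv_text.splitlines()
--     n = len(lines)
--     i = 0
--     while i < n:
--         s = lines[i].strip()
--         if s and not s.startswith('#'):
--             break
--         i += 1
--     if i == n:
--         return [], []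
--     headers = [f.strip() for f in lines[i].strip().split(',')]
--     rows = []
--     for j in range(n - 1, i, -1):
--         s = lines[j].strip()
--         if s and not s.startswith('#'):
--             rows.append([f.strip() for f in s.split(',')])
--     rows.reverse()
--     return headers, rows
-- ===== Notes on version B (the rewrite author's own statement) =====
-- stated objective: alternative
-- what changed: Replaces A's single stateful loop with a headers-seen flag by two staged passes: an index while-loop that locates the header line, then a reverse-order sweep over the remaining lines that collects data rows back-to-front and reverses once at the end.
import Mathlib
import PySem

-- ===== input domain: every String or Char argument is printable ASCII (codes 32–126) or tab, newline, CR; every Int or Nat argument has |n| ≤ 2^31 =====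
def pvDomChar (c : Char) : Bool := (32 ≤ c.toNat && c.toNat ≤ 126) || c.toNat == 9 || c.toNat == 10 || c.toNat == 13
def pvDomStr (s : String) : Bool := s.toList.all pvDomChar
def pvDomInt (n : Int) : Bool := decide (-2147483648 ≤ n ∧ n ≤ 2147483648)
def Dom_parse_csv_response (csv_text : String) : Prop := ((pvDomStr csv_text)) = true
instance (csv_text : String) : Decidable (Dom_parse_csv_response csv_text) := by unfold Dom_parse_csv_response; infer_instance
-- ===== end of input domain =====

-- B replaces A's single stateful loop (mutable headers-seen flag) by two staged
-- passes: locate the header line first, then sweep the later lines in reverse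
-- order collecting data rows back-to-front.

-- ===== PORT A =====

-- '[f.strip() for f in stripped.split(',')]'; split? is none only for an empty
-- separator, so getD [] is never taken for the literal ","
def pvFields (stripped : String) : List String :=
  ((PySem.Str.split? stripped ",").getD []).map PySem.Str.strip

-- the body of A's for-loop, named so the proof lemmas can refer to it
def pvStepA (st : List String × List (List String)) (line : String) :
    List String × List (List String) :=
  let stripped := PySem.Str.strip line
  if stripped == "" || PySem.Str.startswith stripped "#" then st
  else
    let fields := pvFields stripped
    if st.1 == [] then (fields, st.2)
    else (st.1, st.2 ++ [fields])

def parse_csv_response (csv_text : String) : List String × List (List String) :=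
  (PySem.Str.splitlines csv_text).foldl pvStepA ([], [])

-- ===== PORT B =====

-- Source B's 'while i < n: …' header search: the while loop advances an index past
-- skipped lines; structurally, it returns the first kept line (stripped, as
-- lines[i].strip()) together with the suffix after it, or none if i reaches n
def pvFindHdr : List String → Option (String × List String)
  | [] => none
  | l :: ls =>
    let s := PySem.Str.strip l
    if s == "" || PySem.Str.startswith s "#" then pvFindHdr ls else some (s, ls)

-- Source B's descending 'for j in range(n-1, i, -1)' with append, then reverse():
-- iterating the suffix after the header in reverse order, appending kept rows,
-- and reversing the accumulator once at the end
def pvRowsB (rest : List String) : List (List String) :=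
  (rest.reverse.foldl
    (fun acc l =>
      if PySem.Str.strip l == "" || PySem.Str.startswith (PySem.Str.strip l) "#" then acc
      else acc ++ [pvFields (PySem.Str.strip l)])
    []).reverse

def parse_csv_response_alt (csv_text : String) : List String × List (List String) :=
  match pvFindHdr (PySem.Str.splitlines csv_text) with
  | none => ([], [])
  | some (s, rest) => (pvFields s, pvRowsB rest)

-- ===== PRECONDITION & SPEC =====
def Spec_parse_csv_response (csv_text : String) (out : List String × List (List String)) : Prop := out = parse_csv_response_alt csv_text
instance (csv_text : String) (out : List String × List (List String)) : Decidable (Spec_parse_csv_response csv_text out) := by unfold Spec_parse_csv_response; infer_instance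

-- ===== CLAIM (what is proved, stated in full; the proofs are below) =====
def Claim_equal_parse_csv_response : Prop := ∀ (csv_text : String), Dom_parse_csv_response csv_text → Spec_parse_csv_response csv_text (parse_csv_response csv_text)

-- ===== LEMMAS AND PROOFS =====

-- canonical form both sides are reduced to: the kept lines' field rows, in order
def pvClean (lines : List String) : List (List String) :=
  ((lines.map PySem.Str.strip).filter
      (fun s => !(s == "" || PySem.Str.startswith s "#"))).map pvFields

lemma splitOn_go_ne_nil (sep : List Char) :
    ∀ (fuel : Nat) (l cur : List Char) (acc : List (List Char)),
      PySem.Chars.splitOn.go sep fuel l cur acc ≠ [] := by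
  intro fuel
  induction fuel with
  | zero => intro l cur acc; cases l <;> simp [PySem.Chars.splitOn.go]
  | succ n ih =>
    intro l cur acc
    cases l with
    | nil => simp [PySem.Chars.splitOn.go]
    | cons c rest =>
      rw [PySem.Chars.splitOn.go]
      split_ifs with hp
      · exact ih _ _ _
      · exact ih _ _ _

lemma pvFields_ne_nil (s : String) : pvFields s ≠ [] := by
  unfold pvFields
  simp [PySem.Str.split?, PySem.Chars.split?, PySem.Chars.splitOn]
  exact splitOn_go_ne_nil _ _ _ _ _

lemma pvClean_cons_skip (l : String) (ls : List String)
    (hc : (PySem.Str.strip l == "" || PySem.Str.startswith (PySem.Str.strip l) "#") = true) :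
    pvClean (l :: ls) = pvClean ls := by
  simp only [pvClean, List.map_cons, List.filter_cons, hc, Bool.not_true]
  rfl

lemma pvClean_cons_keep (l : String) (ls : List String)
    (hc : (PySem.Str.strip l == "" || PySem.Str.startswith (PySem.Str.strip l) "#") = false) :
    pvClean (l :: ls) = pvFields (PySem.Str.strip l) :: pvClean ls := by
  simp only [pvClean, List.map_cons, List.filter_cons, hc, Bool.not_false, if_pos]

-- B's reverse sweep produces exactly the kept rows in order
lemma pvRowsB_eq_clean (rest : List String) : pvRowsB rest = pvClean rest := by
  unfold pvRowsB
  rw [List.foldl_reverse]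
  induction rest with
  | nil => simp [pvClean]
  | cons l ls ih =>
    rw [List.foldr_cons]
    split_ifs with hc
    · rw [pvClean_cons_skip l ls (by simpa using hc), ← ih]
    · rw [List.reverse_append, List.reverse_singleton, List.singleton_append, ih,
        pvClean_cons_keep l ls (by simpa using hc)]

-- once A has a nonempty header, the rest of its loop appends exactly the kept rows
lemma foldA_nonempty (ls : List String) (h : List String) (rows : List (List String))
    (hh : h ≠ []) :
    ls.foldl pvStepA (h, rows) = (h, rows ++ pvClean ls) := by
  induction ls generalizing rows with
  | nil => simp [pvClean]
  | cons l ls ih =>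
    have hb : (h == ([] : List String)) = false := by simpa using hh
    simp only [List.foldl_cons]
    by_cases hc : (PySem.Str.strip l == "" || PySem.Str.startswith (PySem.Str.strip l) "#") = true
    · have e1 : pvStepA (h, rows) l = (h, rows) := by
        simp only [pvStepA]; rw [if_pos hc]
      rw [e1, ih rows, pvClean_cons_skip l ls hc]
    · have hc' : (PySem.Str.strip l == "" || PySem.Str.startswith (PySem.Str.strip l) "#") = false :=
        by simpa using hc
      have e1 : pvStepA (h, rows) l = (h, rows ++ [pvFields (PySem.Str.strip l)]) := by
        simp only [pvStepA]; rw [if_neg hc, if_neg (by simp [hb])]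
      rw [e1, ih _, pvClean_cons_keep l ls hc']
      simp

-- the whole of A's loop, from the empty state, equals B's two-stage result
lemma foldA_empty (ls : List String) :
    ls.foldl pvStepA ([], []) =
      (match pvFindHdr ls with
       | none => (([] : List String), ([] : List (List String)))
       | some (s, rest) => (pvFields s, pvClean rest)) := by
  induction ls with
  | nil => simp [pvFindHdr]
  | cons l ls ih =>
    simp only [List.foldl_cons]
    by_cases hc : (PySem.Str.strip l == "" || PySem.Str.startswith (PySem.Str.strip l) "#") = true
    · have e1 : pvStepA ([], []) l = ([], []) := by
        simp only [pvStepA]; rw [if_pos hc]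
      have e2 : pvFindHdr (l :: ls) = pvFindHdr ls := by
        simp only [pvFindHdr]; rw [if_pos hc]
      rw [e1, ih, e2]
    · have e1 : pvStepA ([], []) l = (pvFields (PySem.Str.strip l), []) := by
        simp only [pvStepA]; rw [if_neg hc]; norm_num
      have e2 : pvFindHdr (l :: ls) = some (PySem.Str.strip l, ls) := by
        simp only [pvFindHdr]; rw [if_neg hc]
      rw [e1, foldA_nonempty ls _ [] (pvFields_ne_nil _), e2]
      simp

-- ===== VERDICT (by name: the statement is the Claim_ definition above) =====
theorem parse_csv_response_spec : Claim_equal_parse_csv_response := by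
  intro csv_text _
  show parse_csv_response csv_text = parse_csv_response_alt csv_text
  rw [parse_csv_response, parse_csv_response_alt, foldA_empty]
  cases h : pvFindHdr (PySem.Str.splitlines csv_text) with
  | none => rfl
  | some p => cases p; simp [pvRowsB_eq_clean]
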